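-- pv_equiv track=rewrite | github.com/proy87/rotatly | apps/game/creation.py | _encode_board_for_storage
-- ===== SOURCE A (Python) =====
-- from typing import Iterable, Mapping, Sequence, Any
--
-- def _encode_board_for_storage(board: Sequence[int]) -> list[int]:
--     mapping: dict[int, int] = {}
--     next_id = 0
--     encoded_board: list[int] = []
--     for item in board:
--         if item not in mapping:
--             mapping[item] = next_id
--             next_id += 1
--         encoded_board.append(mapping[item])
--     return encoded_board
-- ===== SOURCE B (Python) =====
-- def _encode_board_for_storage(board):
--     # id of x = number of distinct values up to (and including) x's first occurrence, minus 1
--     return [len(set(board[:board.index(x) + 1])) - 1 for x in board]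
-- ===== Notes on version B (the rewrite author's own statement) =====
-- stated objective: alternative
-- what changed: A builds a value-to-id dict with a running counter in one stateful pass; B keeps no mapping or counter at all and computes each id directly as len(set(board[:board.index(x)+1])) - 1, i.e. the distinct-prefix count up to the first occurrence, trading the dict for a per-element closed form (quadratic instead of linear).
import Mathlib
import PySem

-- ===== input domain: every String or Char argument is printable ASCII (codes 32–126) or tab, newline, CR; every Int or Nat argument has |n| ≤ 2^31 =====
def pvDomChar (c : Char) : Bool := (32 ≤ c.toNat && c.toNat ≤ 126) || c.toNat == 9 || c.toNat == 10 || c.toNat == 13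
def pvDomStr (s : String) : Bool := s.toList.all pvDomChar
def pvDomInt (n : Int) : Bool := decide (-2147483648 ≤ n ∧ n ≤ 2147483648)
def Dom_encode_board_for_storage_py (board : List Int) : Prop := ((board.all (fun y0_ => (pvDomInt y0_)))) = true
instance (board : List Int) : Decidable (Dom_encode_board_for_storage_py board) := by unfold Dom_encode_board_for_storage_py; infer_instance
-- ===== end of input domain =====

-- B drops A's dict+counter pass entirely: each id is computed directly as the distinct-prefix count up to the value's first occurrence (alternative algorithm, quadratic instead of linear).


-- ===== PORT A =====
-- 'mapping[item]' is always present at the read; getD 0 is exact there.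
def encode_board_for_storage_py (board : List Int) : List Int :=
  (board.foldl
    (fun (st : PySem.Dict Int Int × Int × List Int) item =>
      let m := st.1
      let n := st.2.1
      let acc := st.2.2
      let p := if m.contains item then (m, n) else (m.insert item n, n + 1)
      (p.1, p.2, acc ++ [p.1.getD item 0]))
    (PySem.Dict.empty, 0, [])).2.2

-- ===== PORT B =====
-- board.index(x) never raises here (x is drawn from board), so index? is always some; 0 is unreachable.
def encode_board_for_storage_py_alt (board : List Int) : List Int :=
  board.map (fun x =>
    match PySem.List.index? board x with
    | some k =>
        PySem.Set.len (PySem.Set.ofList (PySem.List.slice board none (some ((k : Int) + 1)))) - 1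
    | none => 0)

-- ===== PRECONDITION & SPEC =====
def Spec_encode_board_for_storage_py (board : List Int) (out : List Int) : Prop := out = encode_board_for_storage_py_alt board
instance (board : List Int) (out : List Int) : Decidable (Spec_encode_board_for_storage_py board out) := by unfold Spec_encode_board_for_storage_py; infer_instance

-- ===== CLAIM (what is proved, stated in full; the proofs are below) =====
def Claim_equal_encode_board_for_storage_py : Prop := ∀ (board : List Int), Dom_encode_board_for_storage_py board → Spec_encode_board_for_storage_py board (encode_board_for_storage_py board)

-- ===== LEMMAS AND PROOFS =====

-- reference encoding: ids relative to the already-seen distinct list o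
def pvEncRel (o : List Int) : List Int → List Int
  | [] => []
  | x :: xs =>
    if x ∈ o then ((o.idxOf x : Int)) :: pvEncRel o xs
    else ((o.length : Int)) :: pvEncRel (o ++ [x]) xs

lemma pvFoldA (l : List Int) (o : List Int) (m : PySem.Dict Int Int) (acc : List Int)
    (ho : o.Nodup)
    (hm : ∀ x, m.get? x = if x ∈ o then some ((o.idxOf x : Int)) else none) :
    (l.foldl
      (fun (st : PySem.Dict Int Int × Int × List Int) item =>
        let m := st.1
        let n := st.2.1
        let acc := st.2.2
        let p := if m.contains item then (m, n) else (m.insert item n, n + 1)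
        (p.1, p.2, acc ++ [p.1.getD item 0]))
      (m, (o.length : Int), acc)).2.2 = acc ++ pvEncRel o l := by
  induction l generalizing o m acc with
  | nil => simp [pvEncRel]
  | cons x xs ih =>
    simp only [List.foldl_cons]
    by_cases hx : x ∈ o
    · have hc : m.contains x = true := by
        rw [PySem.Dict.contains_eq_isSome_get?, hm x]; simp [hx]
      have hg : m.getD x 0 = (o.idxOf x : Int) := by
        rw [PySem.Dict.getD_eq_get?_getD, hm x]; simp [hx]
      simp only [hc, if_true, hg]
      rw [ih o m _ ho hm]
      simp [pvEncRel, hx]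
    · have hc : m.contains x = false := by
        rw [PySem.Dict.contains_eq_isSome_get?, hm x]; simp [hx]
      have hm' : ∀ y, (m.insert x (o.length : Int)).get? y
          = if y ∈ o ++ [x] then some (((o ++ [x]).idxOf y : Int)) else none := by
        intro y
        by_cases hyx : y = x
        · subst hyx
          simp [PySem.Dict.get?_insert_self, hx, List.idxOf_append_of_notMem hx,
            List.idxOf_cons_self]
        · rw [PySem.Dict.get?_insert_of_ne _ _ hyx, hm y]
          by_cases hy : y ∈ o
          · simp [hy, List.idxOf_append_of_mem hy]
          · simp [hy, hyx]
      have ho' : (o ++ [x]).Nodup := by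
        exact List.Nodup.append ho (List.nodup_singleton x)
          (fun a ha hax => hx ((List.mem_singleton.mp hax) ▸ ha))
      have hg : (m.insert x (o.length : Int)).getD x 0 = (o.length : Int) := by
        rw [PySem.Dict.getD_eq_get?_getD, PySem.Dict.get?_insert_self]; rfl
      simp only [hc, Bool.false_eq_true, if_false]
      have hlen : (o.length : Int) + 1 = ((o ++ [x]).length : Int) := by simp
      rw [hlen, ih (o ++ [x]) (m.insert x (o.length : Int)) _ ho' hm', hg]
      simp [pvEncRel, hx]

-- ids relative to o are first-occurrence indices in the final distinct list
lemma pvMapIdx (l o : List Int) (ho : o.Nodup) :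
    l.map (fun x => ((PySem.Set.update o l).idxOf x : Int)) = pvEncRel o l := by
  induction l generalizing o with
  | nil => simp [pvEncRel, PySem.Set.update_nil]
  | cons x xs ih =>
    rw [PySem.Set.update_cons]
    have hpre : ∀ y ∈ PySem.Set.add o x,
        (PySem.Set.update (PySem.Set.add o x) xs).idxOf y = (PySem.Set.add o x).idxOf y := by
      intro y hy
      rw [PySem.Set.update_eq_append_filter, List.idxOf_append_of_mem hy]
    have hmem : x ∈ PySem.Set.add o x := by
      rw [PySem.Set.mem_add]; right; rfl
    have hnodup' : (PySem.Set.add o x).Nodup := PySem.Set.nodup_add (s := o) x ho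
    simp only [List.map_cons, ih (PySem.Set.add o x) hnodup']
    rw [hpre x hmem]
    by_cases hx : x ∈ o
    · simp [pvEncRel, hx]
    · simp [pvEncRel, hx, List.idxOf_append_of_notMem hx, List.idxOf_cons_self]

lemma pvIdxOf?_of_mem (xs : List Int) (x : Int) (h : x ∈ xs) :
    List.idxOf? x xs = some (xs.idxOf x) := by
  induction xs with
  | nil => simp at h
  | cons y ys ih =>
    by_cases hxy : y = x
    · subst hxy; simp [List.idxOf?_cons, List.idxOf_cons_self]
    · have hmem : x ∈ ys := (List.mem_cons.mp h).resolve_left (fun e => hxy e.symm)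
      simp [List.idxOf?_cons, hxy, List.idxOf_cons_ne _ hxy, ih hmem]

-- the distinct count of the prefix through x's first occurrence is x's id + 1
lemma pvPrefixLen (l : List Int) (o : List Int) (x : Int) (hx : x ∈ l) (ho : x ∉ o) :
    (PySem.Set.update o (l.take (l.idxOf x + 1))).length
      = (PySem.Set.update o l).idxOf x + 1 := by
  induction l generalizing o with
  | nil => simp at hx
  | cons y ys ih =>
    have hadd_mem : x ∈ PySem.Set.add o y ↔ (x ∈ o ∨ x = y) := PySem.Set.mem_add o y x
    by_cases hxy : x = y
    · subst hxy
      have hidx0 : List.idxOf x (x :: ys) = 0 := List.idxOf_cons_self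
      have haddx : PySem.Set.add o x = o ++ [x] := by
        simp [PySem.Set.add, PySem.Set.contains, ho]
      have hmem : x ∈ PySem.Set.add o x := by rw [PySem.Set.mem_add]; right; rfl
      rw [hidx0]
      have htake : (x :: ys).take (0 + 1) = [x] := by simp
      rw [htake, PySem.Set.update_cons, PySem.Set.update_nil, PySem.Set.update_cons,
        PySem.Set.update_eq_append_filter, List.idxOf_append_of_mem hmem, haddx,
        List.idxOf_append_of_notMem ho]
      simp
    · have hmem : x ∈ ys := (List.mem_cons.mp hx).resolve_left hxy
      have hne : y ≠ x := fun e => hxy e.symm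
      have ho' : x ∉ PySem.Set.add o y := by
        rw [PySem.Set.mem_add]; rintro (h | h); exact ho h; exact hxy h
      have hidx : List.idxOf x (y :: ys) = List.idxOf x ys + 1 :=
        List.idxOf_cons_ne _ hne
      rw [hidx]
      have htake : (y :: ys).take (List.idxOf x ys + 1 + 1)
          = y :: ys.take (List.idxOf x ys + 1) := by simp
      rw [htake, PySem.Set.update_cons, PySem.Set.update_cons]
      exact ih (PySem.Set.add o y) hmem ho'

-- ===== VERDICT (by name: the statement is the Claim_ definition above) =====
theorem encode_board_for_storage_py_spec : Claim_equal_encode_board_for_storage_py := by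
  intro board _
  unfold Spec_encode_board_for_storage_py encode_board_for_storage_py encode_board_for_storage_py_alt
  have hA := pvFoldA board [] PySem.Dict.empty [] List.nodup_nil
    (by intro x; simp [PySem.Dict.get?_empty])
  simp only [List.length_nil, Int.ofNat_zero] at hA
  rw [hA]
  rw [← pvMapIdx board [] List.nodup_nil]
  simp only [List.nil_append]
  apply List.map_congr_left
  intro x hx
  rw [PySem.List.index?_eq_idxOf?, pvIdxOf?_of_mem board x hx]
  have hcast : ((board.idxOf x : Int) + 1) = (((board.idxOf x + 1 : Nat)) : Int) := by
    push_cast; ring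
  have hlen := pvPrefixLen board [] x hx (by simp)
  have hofl : PySem.Set.ofList (board.take (board.idxOf x + 1))
      = PySem.Set.update [] (board.take (board.idxOf x + 1)) := by
    rw [PySem.Set.update_nil_left]
  simp only [hcast, PySem.List.slice_to_natCast, PySem.Set.len, hofl]
  rw [hlen]
  push_cast
  ring
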